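-- pv_equiv track=rewrite | github.com/hyer0705/Algorithm_Study | Seori/Programmers/사라지는 발판.py | solution
-- ===== SOURCE A (Python) =====
-- def solution(board, aloc, bloc):
--
--     direction = [(0, -1), (-1, 0), (1, 0), (0, 1)]
--
--     def dfs(board, my_loc, your_loc, turn):
--         # [1] 재귀 종료 조건. 지금 내 발판이 0인 경우 패배 확정이다.
--         x, y = my_loc
--         if board[x][y] == 0:
--             return turn, 0
--
--         # [2] 4방향을 탐색하며 가능한 경우 재귀를 시작한다.
--         winner = False
--         max_move = 0
--         min_move = float('inf')
--         for dx, dy in direction: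
--             nx, ny = x + dx, y + dy
--             if 0 <= nx < len(board) and 0 <= ny < len(board[0]) and board[nx][ny] == 1:
--
--                 # [3] 움직이기 위해 지금 발판을 0처리 해주고,
--                 board[x][y] = 0
--                 loser, move = dfs(board, your_loc, [nx, ny], not turn) # 재귀를 할 땐 플레이어 순서를 바꿔준다.
--                 # [4] 재귀 탐색이 끝나면 발판을 다시 1 처리해준다.(백트래킹)
--                 board[x][y] = 1
--
--                 # [5] 지금이 진 사람의 턴이라면 최대한 오래 버티도록 플레이
--                 if turn == loser:
--                     max_move = max(max_move, move + 1)
--                 # [6] 지금이 이긴 사람의 턴이라면 최대한 빨리 이기도록 플레이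
--                 else:
--                     winner = True
--                     min_move = min(min_move, move + 1)
--
--
--         # [7] 승/패에 맞게 움직임 횟수를 반환
--         if winner:
--             return (not turn, min_move)
--         else:
--             return (turn, max_move)
--
--     return dfs(board, aloc, bloc, False)[1]
-- ===== SOURCE B (Python) =====
-- def solution(board, aloc, bloc):
--     R, C = len(board), len(board[0])
--     alive = frozenset((i, j) for i in range(R) for j in range(C) if board[i][j] == 1)
--     ax, ay = aloc
--     if board[ax][ay] != 1:
--         return 0  # player A has no intact platform to stand on: the game ends after 0 moves
--
--     memo = {}  # transposition table: game state -> its value, each state evaluated once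
--
--     def win(alive, me, you):
--         # memoized game value: (does the player to move win?, number of moves from here)
--         key = (alive, me, you)
--         if key in memo:
--             return memo[key]
--         if me not in alive:
--             res = (False, 0)
--         else:
--             rest = alive - {me}
--             children = [win(rest, you, (me[0] + dx, me[1] + dy))
--                         for dx, dy in ((0, -1), (-1, 0), (1, 0), (0, 1))
--                         if (me[0] + dx, me[1] + dy) in alive]
--             if not children:
--                 res = (False, 0)
--             else:
--                 losing = [m for w, m in children if not w]
--                 if losing:
--                     res = (True, 1 + min(losing))
--                 else:
--                     res = (False, 1 + max(m for _, m in children))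
--         memo[key] = res
--         return res
--
--     return win(alive, (ax, ay), tuple(bloc))[1]
-- ===== Notes on version B (the rewrite author's own statement) =====
-- stated objective: alternative
-- what changed: B replaces A's backtracking search that mutates the grid in place (zeroing/restoring cells, absolute turn labels, threaded max/min accumulators) by a memoized dynamic programme: a pure recursion over an immutable frozenset of alive cells returning relative (current-player-wins, game-length) pairs, cached in a transposition table keyed by (alive, me, you) so each game state is evaluated once; the cache trades per-node frozenset/hash overhead for pruning repeated subtrees.
-- outside the precondition, e.g. on solution([[1, 1], [1, 2]], [0, 0], [1, 1]): A returns 2, B returns 1; on solution([[1, 1], [1, 1]], [-1, 0], [0, 1]): A returns 2, B returns 0; on solution([[0, 1], [0]], [0, 0], [0, 1]): A returns 0, B raises IndexError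
import Mathlib
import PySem

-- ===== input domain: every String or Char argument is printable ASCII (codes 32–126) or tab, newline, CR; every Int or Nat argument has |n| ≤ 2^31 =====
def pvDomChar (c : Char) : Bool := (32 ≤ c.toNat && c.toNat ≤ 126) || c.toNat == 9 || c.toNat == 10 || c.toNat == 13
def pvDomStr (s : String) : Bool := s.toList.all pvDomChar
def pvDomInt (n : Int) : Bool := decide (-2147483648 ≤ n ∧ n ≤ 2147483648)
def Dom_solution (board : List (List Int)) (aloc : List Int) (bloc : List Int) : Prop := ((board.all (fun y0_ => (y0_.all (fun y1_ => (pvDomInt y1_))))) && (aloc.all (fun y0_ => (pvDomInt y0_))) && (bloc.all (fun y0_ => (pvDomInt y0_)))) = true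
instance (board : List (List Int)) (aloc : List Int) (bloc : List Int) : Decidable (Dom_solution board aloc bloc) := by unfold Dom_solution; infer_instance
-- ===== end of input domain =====

-- B replaces A's mutate-and-restore grid backtracking (absolute turn labels, threaded max/min) by a
-- memoized dynamic programme: a pure recursion over an immutable frozenset of alive cells returning
-- relative (current-player-wins, game-length) pairs, cached in a transposition table keyed by
-- (alive, me, you) (objective: alternative; the cache trades per-node set/hash overhead for pruning
-- repeated subtrees). A mutates `board` in place but restores it before returning; the claim is about
-- the return value.


-- ===== PORT A =====
-- board[x][y]  (exact under Pre_: indices in range)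
def pvCellA (b : List (List Int)) (x y : Int) : Int :=
  PySem.List.pyGetD (PySem.List.pyGetD b x []) y 0

-- board[x][y] = v  (exact under Pre_: indices in range)
def pvSetA (b : List (List Int)) (x y v : Int) : List (List Int) :=
  PySem.List.pySetD b x (PySem.List.pySetD (PySem.List.pyGetD b x []) y v)

-- the dfs helper of A; the mutated board is threaded through and returned ("float('inf')" for
-- min_move is modelled as `Option Int`, `none` = inf — it is only read when winner = true, where it
-- is `some`); fuel is a totalization guard only, never exhausted from `solution`'s call.
def pvDfsA : Nat → List (List Int) → List Int → List Int → Bool → ((Bool × Int) × List (List Int))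
  | 0, b, _, _, turn => ((turn, 0), b)
  | fuel+1, b, my, your, turn =>
    match my with
    | [x, y] =>
      if pvCellA b x y = 0 then ((turn, 0), b)
      else
        let res := [((0:Int), (-1:Int)), (-1, 0), (1, 0), (0, 1)].foldl
          (fun (st : Bool × Int × Option Int × List (List Int)) d =>
            let nx := x + d.1
            let ny := y + d.2
            if 0 ≤ nx ∧ nx < (st.2.2.2.length : Int) ∧ 0 ≤ ny ∧
                ny < ((PySem.List.pyGetD st.2.2.2 0 []).length : Int) ∧ pvCellA st.2.2.2 nx ny = 1 then
              let b1 := pvSetA st.2.2.2 x y 0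
              let r := pvDfsA fuel b1 your [nx, ny] (!turn)
              let b2 := pvSetA r.2 x y 1
              if turn == r.1.1 then
                (st.1, max st.2.1 (r.1.2 + 1), st.2.2.1, b2)
              else
                (true, st.2.1,
                  (match st.2.2.1 with
                   | none => some (r.1.2 + 1)
                   | some m => some (min m (r.1.2 + 1))), b2)
            else st)
          (false, 0, none, b)
        if res.1 then ((!turn, res.2.2.1.getD 0), res.2.2.2)
        else ((turn, res.2.1), res.2.2.2)
    | _ => ((turn, 0), b)

def solution (board : List (List Int)) (aloc : List Int) (bloc : List Int) : Int :=
  (pvDfsA (board.length * (PySem.List.pyGetD board 0 []).length + 2) board aloc bloc false).1.2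

-- ===== PORT B =====
-- board[i][j]  (exact under Pre_: indices in range)
def pvCellB (b : List (List Int)) (x y : Int) : Int :=
  PySem.List.pyGetD (PySem.List.pyGetD b x []) y 0

-- the set comprehension frozenset((i, j) for i in range(R) for j in range(C) if board[i][j] == 1)
def pvAliveB (b : List (List Int)) (R C : Int) : PySem.Set (Int × Int) :=
  (PySem.List.pyRange 0 R 1).foldl
    (fun s i =>
      (PySem.List.pyRange 0 C 1).foldl
        (fun s j => if pvCellB b i j = 1 then PySem.Set.add s (i, j) else s) s)
    PySem.Set.empty

-- the memo dict of B: keyed by (alive frozenset, me, you).  The reachable alive sets are all built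
-- from the initial set by successive removals, so their PySem.Set element lists are canonical and
-- list equality of keys coincides with Python's frozenset equality on every key that occurs.
abbrev PvMemo := PySem.Dict (PySem.Set (Int × Int) × (Int × Int) × (Int × Int)) (Bool × Int)

-- the win helper of B: memoized pure recursion on an immutable alive set, result relative to the
-- mover; the memo dict is threaded through and returned (Python mutates the closed-over dict);
-- fuel is a totalization guard only, never exhausted from `solution_alt`'s call.
def pvWinB : Nat → PvMemo → PySem.Set (Int × Int) → (Int × Int) → (Int × Int) → ((Bool × Int) × PvMemo)
  | 0, memo, _, _, _ => ((false, 0), memo)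
  | fuel+1, memo, alive, me, you =>
    match PySem.Dict.get? memo (alive, me, you) with
    | some v => (v, memo)                               -- if key in memo: return memo[key]
    | none =>
      let p :=
        if me ∈ alive then
          -- children = [win(alive - {me}, you, n) for dx, dy in dirs if n in alive]
          let rest := PySem.Set.diff alive [me]
          let q := [((0:Int), (-1:Int)), (-1, 0), (1, 0), (0, 1)].foldl
            (fun (acc : List (Bool × Int) × PvMemo) d =>
              let n := (me.1 + d.1, me.2 + d.2)
              if n ∈ alive then
                let r := pvWinB fuel acc.2 rest you n
                (acc.1 ++ [r.1], r.2)
              else acc)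
            ([], memo)
          if q.1.isEmpty then (((false : Bool), (0 : Int)), q.2)
          else
            let losing := q.1.filterMap (fun c => if c.1 then none else some c.2)
            match PySem.List.min? losing (fun m => m) with
            | some m => ((true, 1 + m), q.2)            -- res = (True, 1 + min(losing))
            | none => ((false, 1 + (PySem.List.max? (q.1.map (·.2)) (fun m => m)).getD 0), q.2)
              -- q.1 is nonempty here, so max? is `some`; getD is never read as 0
        else (((false : Bool), (0 : Int)), memo)
      (p.1, PySem.Dict.insert p.2 (alive, me, you) p.1)  -- memo[key] = res; return res

def solution_alt (board : List (List Int)) (aloc : List Int) (bloc : List Int) : Int :=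
  let R : Int := (board.length : Int)
  let C : Int := ((PySem.List.pyGetD board 0 []).length : Int)
  let alive := pvAliveB board R C
  match aloc with
  | [ax, ay] =>
    if pvCellB board ax ay ≠ 1 then 0  -- board[ax][ay] != 1 (pyGetD: Python's wraparound read; exact under Pre_)
    else
      match bloc with
      | [bx, by'] =>
        (pvWinB (board.length * (PySem.List.pyGetD board 0 []).length + 2) PySem.Dict.empty
          alive (ax, ay) (bx, by')).1.2
      | _ => 0  -- tuple(bloc) of arity ≠ 2 is never reached by win under Pre_: win returns (False, 0)
  | _ => 0  -- 'ax, ay = aloc' raises in Python B here (outside Pre_)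

-- ===== PRECONDITION & SPEC =====
-- board value accessor used by Pre_ only (indices are known nonnegative and in range there)
def pvVal (b : List (List Int)) (x y : Int) : Int := (b.getD x.toNat []).getD y.toNat 0

-- Pre_ excludes inputs where A raises (aloc not a 2-list, empty boards, rows shorter than row 0,
-- locations outside Python's wraparound range) and, when the A player has an adjacent in-range cell
-- of value 1 (so the game actually starts), three corners where A returns an accidental value: a
-- non-rectangular board, negative location coordinates (Python's index wraparound), and boards whose
-- cell at aloc or bloc is neither 0 nor 1 (A's backtracking restores such a cell to 1, leaking a
-- value into sibling branches that no natural reimplementation matches).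
def Pre_solution (board : List (List Int)) (aloc : List Int) (bloc : List Int) : Prop :=
  board ≠ [] ∧ (∀ row ∈ board, (board.headD []).length ≤ row.length) ∧
  aloc.length = 2 ∧
  -(board.length : Int) ≤ aloc.getD 0 0 ∧ aloc.getD 0 0 < (board.length : Int) ∧
  -((board.getD (if aloc.getD 0 0 < 0 then aloc.getD 0 0 + (board.length : Int)
      else aloc.getD 0 0).toNat []).length : Int) ≤ aloc.getD 1 0 ∧
  aloc.getD 1 0 < ((board.getD (if aloc.getD 0 0 < 0 then aloc.getD 0 0 + (board.length : Int)
      else aloc.getD 0 0).toNat []).length : Int) ∧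
  (((∀ row ∈ board, row.length = (board.headD []).length) ∧
    0 ≤ aloc.getD 0 0 ∧ 0 ≤ aloc.getD 1 0 ∧
    bloc.length = 2 ∧
    0 ≤ bloc.getD 0 0 ∧ bloc.getD 0 0 < (board.length : Int) ∧
    0 ≤ bloc.getD 1 0 ∧ bloc.getD 1 0 < ((board.headD []).length : Int) ∧
    (pvVal board (aloc.getD 0 0) (aloc.getD 1 0) = 0 ∨ pvVal board (aloc.getD 0 0) (aloc.getD 1 0) = 1) ∧
    (pvVal board (bloc.getD 0 0) (bloc.getD 1 0) = 0 ∨ pvVal board (bloc.getD 0 0) (bloc.getD 1 0) = 1)) ∨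
   (∀ d ∈ ([(0, -1), (-1, 0), (1, 0), (0, 1)] : List (Int × Int)),
      ¬(0 ≤ aloc.getD 0 0 + d.1 ∧ aloc.getD 0 0 + d.1 < (board.length : Int) ∧
        0 ≤ aloc.getD 1 0 + d.2 ∧ aloc.getD 1 0 + d.2 < ((board.headD []).length : Int) ∧
        pvVal board (aloc.getD 0 0 + d.1) (aloc.getD 1 0 + d.2) = 1)))

instance (board : List (List Int)) (aloc : List Int) (bloc : List Int) : Decidable (Pre_solution board aloc bloc) := by unfold Pre_solution; infer_instance

def pvWitness_solution : List (List Int) × List Int × List Int := ([[1, 1], [1, 1]], [0, 0], [1, 1])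

def Spec_solution (board : List (List Int)) (aloc : List Int) (bloc : List Int) (out : Int) : Prop := out = solution_alt board aloc bloc
instance (board : List (List Int)) (aloc : List Int) (bloc : List Int) (out : Int) : Decidable (Spec_solution board aloc bloc out) := by unfold Spec_solution; infer_instance

-- ===== CLAIM (what is proved, stated in full; the proofs are below) =====
def Claim_equal_solution : Prop := ∀ (board : List (List Int)) (aloc : List Int) (bloc : List Int), Dom_solution board aloc bloc → Pre_solution board aloc bloc → Spec_solution board aloc bloc (solution board aloc bloc)

-- ===== LEMMAS AND PROOFS =====

def pvDirs : List (Int × Int) := [(0, -1), (-1, 0), (1, 0), (0, 1)]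

def pvCols (b : List (List Int)) : Nat := (b.headD []).length

def pvInB (b : List (List Int)) (p : Int × Int) : Prop :=
  0 ≤ p.1 ∧ p.1 < (b.length : Int) ∧ 0 ≤ p.2 ∧ p.2 < (pvCols b : Int)

def pvRect (b : List (List Int)) : Prop := ∀ row ∈ b, row.length = pvCols b

def pvGood (s : PySem.Set (Int × Int)) (b : List (List Int)) : Prop :=
  ∀ p : Int × Int, p ∈ s ↔ pvInB b p ∧ pvVal b p.1 p.2 = 1

-- proof-only specification: B's game value WITHOUT the memo (the memoized port is
-- reduced to this below, A's dfs is related to it by mainLem)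
def pvWinP : Nat → PySem.Set (Int × Int) → (Int × Int) → (Int × Int) → (Bool × Int)
  | 0, _, _, _ => (false, 0)
  | fuel+1, alive, me, you =>
    if me ∈ alive then
      let rest := PySem.Set.diff alive [me]
      let children := [((0:Int), (-1:Int)), (-1, 0), (1, 0), (0, 1)].filterMap
        (fun d =>
          let n := (me.1 + d.1, me.2 + d.2)
          if n ∈ alive then some (pvWinP fuel rest you n) else none)
      if children.isEmpty then (false, 0)
      else
        let losing := children.filterMap (fun c => if c.1 then none else some c.2)
        match PySem.List.min? losing (fun m => m) with
        | some m => (true, 1 + m)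
        | none => (false, 1 + (PySem.List.max? (children.map (·.2)) (fun m => m)).getD 0)
    else (false, 0)

def pvKids (f : Nat) (s : PySem.Set (Int × Int)) (x y u v : Int) (dirs : List (Int × Int)) :
    List (Bool × Int) :=
  dirs.filterMap (fun d =>
    if (x + d.1, y + d.2) ∈ s then
      some (pvWinP f (PySem.Set.diff s [(x, y)]) (u, v) (x + d.1, y + d.2))
    else none)

def pvLosing (cs : List (Bool × Int)) : List Int :=
  cs.filterMap (fun c => if c.1 then none else some c.2)

def pvWinning (cs : List (Bool × Int)) : List Int :=
  cs.filterMap (fun c => if c.1 then some c.2 else none)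

lemma winning_eq_map {cs : List (Bool × Int)} (h : pvLosing cs = []) :
    pvWinning cs = cs.map (·.2) := by
  induction cs with
  | nil => rfl
  | cons c t ih =>
    by_cases hc : c.1
    · have ht : pvLosing t = [] := by
        simpa [pvLosing, hc] using h
      have hcons : pvWinning (c :: t) = c.2 :: pvWinning t := by simp [pvWinning, hc]
      rw [hcons, ih ht]
      rfl
    · exfalso
      have : pvLosing (c :: t) = c.2 :: pvLosing t := by simp [pvLosing, hc]
      rw [this] at h
      cases h

def pvMinStep : Option Int → Int → Option Int :=
  fun o m => some (match o with | none => m + 1 | some c => min c (m + 1))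

lemma pyGetD0 (b : List (List Int)) : PySem.List.pyGetD b 0 [] = b.headD [] := by
  rw [PySem.List.pyGetD_of_nonneg b [] le_rfl]
  cases b <;> simp [List.getD]

lemma cellA_eq (b : List (List Int)) {x y : Int} (hx : 0 ≤ x) (hy : 0 ≤ y) :
    pvCellA b x y = pvVal b x y := by
  unfold pvCellA pvVal
  rw [PySem.List.pyGetD_of_nonneg b [] hx, PySem.List.pyGetD_of_nonneg _ 0 hy]

lemma cellB_eq (b : List (List Int)) {x y : Int} (hx : 0 ≤ x) (hy : 0 ≤ y) :
    pvCellB b x y = pvVal b x y := by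
  unfold pvCellB pvVal
  rw [PySem.List.pyGetD_of_nonneg b [] hx, PySem.List.pyGetD_of_nonneg _ 0 hy]

lemma setA_eq (b : List (List Int)) {x y : Int} (v : Int) (hx : 0 ≤ x) (hy : 0 ≤ y) :
    pvSetA b x y v = b.set x.toNat ((b.getD x.toNat []).set y.toNat v) := by
  unfold pvSetA
  rw [PySem.List.pyGetD_of_nonneg b [] hx, PySem.List.pySetD_of_nonneg _ _ hy,
    PySem.List.pySetD_of_nonneg _ _ hx]

lemma length_setA (b : List (List Int)) {x y : Int} (v : Int) (hx : 0 ≤ x) (hy : 0 ≤ y) :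
    (pvSetA b x y v).length = b.length := by
  rw [setA_eq b v hx hy]; simp

lemma cols_setA (b : List (List Int)) {x y : Int} (v : Int) (hx : 0 ≤ x) (hy : 0 ≤ y) :
    pvCols (pvSetA b x y v) = pvCols b := by
  rw [setA_eq b v hx hy]
  cases b with
  | nil => simp
  | cons r t =>
    cases hxt : x.toNat with
    | zero => simp [pvCols, List.set, List.getD]
    | succ n => simp [pvCols, List.set]

lemma rect_setA (b : List (List Int)) {x y : Int} (v : Int) (hx : 0 ≤ x) (hy : 0 ≤ y)
    (hr : pvRect b) : pvRect (pvSetA b x y v) := by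
  intro row hrow
  rw [cols_setA b v hx hy]
  rw [setA_eq b v hx hy] at hrow
  by_cases hlt : x.toNat < b.length
  · rcases List.mem_or_eq_of_mem_set hrow with h | h
    · exact hr row h
    · subst h
      rw [List.length_set, List.getD_eq_getElem b [] hlt]
      exact hr _ (List.getElem_mem hlt)
  · rw [List.set_eq_of_length_le (le_of_not_gt hlt)] at hrow
    exact hr row hrow

lemma inB_setA (b : List (List Int)) {x y : Int} (v : Int) (hx : 0 ≤ x) (hy : 0 ≤ y) (p : Int × Int) :
    pvInB (pvSetA b x y v) p ↔ pvInB b p := by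
  unfold pvInB
  rw [length_setA b v hx hy, cols_setA b v hx hy]

lemma val_setA_self (b : List (List Int)) {x y : Int} (v : Int) (hx : 0 ≤ x) (hy : 0 ≤ y)
    (hxl : x < (b.length : Int)) (hyl : y < (pvCols b : Int)) (hr : pvRect b) :
    pvVal (pvSetA b x y v) x y = v := by
  rw [setA_eq b v hx hy]
  unfold pvVal
  have hxlt : x.toNat < b.length := by omega
  have hrowmem : b.getD x.toNat [] ∈ b := by
    rw [List.getD_eq_getElem b [] hxlt]; exact List.getElem_mem hxlt
  have hylt : y.toNat < (b.getD x.toNat []).length := by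
    rw [hr _ hrowmem]; omega
  simp only [List.getD_eq_getElem?_getD] at hylt ⊢
  have hA : (b.set x.toNat ((b[x.toNat]?.getD []).set y.toNat v))[x.toNat]? =
      some ((b[x.toNat]?.getD []).set y.toNat v) := by
    simp [hxlt]
  rw [hA]
  simp [hylt]

lemma val_setA_ne (b : List (List Int)) {x y : Int} (v : Int) (hx : 0 ≤ x) (hy : 0 ≤ y)
    {p : Int × Int} (hp1 : 0 ≤ p.1) (hp2 : 0 ≤ p.2) (hne : p ≠ (x, y)) :
    pvVal (pvSetA b x y v) p.1 p.2 = pvVal b p.1 p.2 := by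
  rw [setA_eq b v hx hy]
  unfold pvVal
  simp only [List.getD_eq_getElem?_getD]
  by_cases h1 : p.1.toNat = x.toNat ∧ x.toNat < b.length
  · obtain ⟨heq, hxlt⟩ := h1
    have hpx : p.1 = x := by omega
    have h2 : p.2.toNat ≠ y.toNat := by
      have h2' : p.2 ≠ y := fun h2 => hne (Prod.ext hpx h2)
      omega
    rw [heq]
    have hA : (b.set x.toNat ((b[x.toNat]?.getD []).set y.toNat v))[x.toNat]? =
        some ((b[x.toNat]?.getD []).set y.toNat v) := by
      simp [hxlt]
    rw [hA]
    simp [List.getElem?_set_ne (Ne.symm h2)]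
  · by_cases hxlt : x.toNat < b.length
    · have hpn : x.toNat ≠ p.1.toNat := fun h => h1 ⟨h.symm, hxlt⟩
      rw [List.getElem?_set_ne hpn]
    · rw [List.set_eq_of_length_le (le_of_not_gt hxlt)]

lemma restoreA (b : List (List Int)) {x y : Int} (hx : 0 ≤ x) (hy : 0 ≤ y)
    (hxl : x < (b.length : Int)) (hyl : y < (pvCols b : Int)) (hr : pvRect b)
    (hval : pvVal b x y = 1) :
    pvSetA (pvSetA b x y 0) x y 1 = b := by
  have hxlt : x.toNat < b.length := by omega
  have hrowmem : b.getD x.toNat [] ∈ b := by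
    rw [List.getD_eq_getElem b [] hxlt]; exact List.getElem_mem hxlt
  have hylt : y.toNat < (b.getD x.toNat []).length := by
    rw [hr _ hrowmem]; omega
  rw [setA_eq b 0 hx hy, setA_eq _ 1 hx hy]
  have hA : (b.set x.toNat ((b.getD x.toNat []).set y.toNat 0)).getD x.toNat [] =
      (b.getD x.toNat []).set y.toNat 0 := by
    simp [List.getD_eq_getElem?_getD, hxlt]
  rw [hA, List.set_set, List.set_set]
  have hrow1 : (b.getD x.toNat []).set y.toNat 1 = b.getD x.toNat [] := by
    have : (1 : Int) = (b.getD x.toNat [])[y.toNat] := by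
      rw [← List.getD_eq_getElem _ 0 hylt]
      unfold pvVal at hval
      omega
    rw [this]
    exact List.set_getElem_self hylt
  rw [hrow1, List.getD_eq_getElem b [] hxlt]
  exact List.set_getElem_self hxlt

lemma ne_setA (b : List (List Int)) {x y : Int} (v : Int) (hx : 0 ≤ x) (hy : 0 ≤ y)
    (hb : b ≠ []) : pvSetA b x y v ≠ [] := by
  intro h
  have := length_setA b v hx hy
  rw [h] at this
  exact hb (List.eq_nil_of_length_eq_zero this.symm)

lemma good_diff (b : List (List Int)) {x y : Int} (s : PySem.Set (Int × Int))
    (hx : 0 ≤ x) (hy : 0 ≤ y) (hxl : x < (b.length : Int)) (hyl : y < (pvCols b : Int))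
    (hr : pvRect b) (hgood : pvGood s b) :
    pvGood (PySem.Set.diff s [(x, y)]) (pvSetA b x y 0) := by
  intro p
  rw [PySem.Set.mem_diff, hgood p, inB_setA b 0 hx hy p]
  constructor
  · rintro ⟨⟨hin, hv⟩, hne⟩
    simp only [List.mem_singleton] at hne
    refine ⟨hin, ?_⟩
    rw [val_setA_ne b 0 hx hy hin.1 hin.2.2.1 hne]
    exact hv
  · rintro ⟨hin, hv⟩
    by_cases hne : p = (x, y)
    · subst hne
      rw [val_setA_self b 0 hx hy hxl hyl hr] at hv
      exact absurd hv (by norm_num)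
    · rw [val_setA_ne b 0 hx hy hin.1 hin.2.2.1 hne] at hv
      exact ⟨⟨hin, hv⟩, by simpa using hne⟩

-- membership in the alive-set comprehension
lemma mem_inner_fold (b : List (List Int)) (i : Int) (l : List Int)
    (s0 : PySem.Set (Int × Int)) (q : Int × Int) :
    q ∈ l.foldl (fun s j => if pvCellB b i j = 1 then PySem.Set.add s (i, j) else s) s0 ↔
      q ∈ s0 ∨ ∃ j ∈ l, pvCellB b i j = 1 ∧ q = (i, j) := by
  induction l generalizing s0 with
  | nil => simp
  | cons j t ih =>
    simp only [List.foldl_cons]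
    by_cases h : pvCellB b i j = 1
    · rw [if_pos h, ih, PySem.Set.mem_add]
      constructor
      · rintro (( h1 | h1 ) | ⟨j', hj', h1, h2⟩)
        · exact Or.inl h1
        · exact Or.inr ⟨j, by simp, h, h1⟩
        · exact Or.inr ⟨j', by simp [hj'], h1, h2⟩
      · rintro (h1 | ⟨j', hj', h1, h2⟩)
        · exact Or.inl (Or.inl h1)
        · rcases List.mem_cons.mp hj' with rfl | hj'
          · subst h2; exact Or.inl (Or.inr rfl)
          · exact Or.inr ⟨j', hj', h1, h2⟩
    · rw [if_neg h, ih]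
      constructor
      · rintro (h1 | ⟨j', hj', h1, h2⟩)
        · exact Or.inl h1
        · exact Or.inr ⟨j', by simp [hj'], h1, h2⟩
      · rintro (h1 | ⟨j', hj', h1, h2⟩)
        · exact Or.inl h1
        · rcases List.mem_cons.mp hj' with rfl | hj'
          · exact absurd h1 h
          · exact Or.inr ⟨j', hj', h1, h2⟩

lemma mem_alive (b : List (List Int)) (q : Int × Int) :
    q ∈ pvAliveB b (b.length : Int) (pvCols b : Int) ↔ pvInB b q ∧ pvVal b q.1 q.2 = 1 := by
  unfold pvAliveB
  have outer : ∀ (rows : List Int) (s0 : PySem.Set (Int × Int)),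
      (q ∈ rows.foldl (fun s i => (PySem.List.pyRange 0 (pvCols b : Int) 1).foldl
          (fun s j => if pvCellB b i j = 1 then PySem.Set.add s (i, j) else s) s) s0 ↔
        q ∈ s0 ∨ ∃ i ∈ rows, ∃ j ∈ PySem.List.pyRange 0 (pvCols b : Int) 1,
          pvCellB b i j = 1 ∧ q = (i, j)) := by
    intro rows
    induction rows with
    | nil => simp
    | cons i t ih =>
      intro s0
      simp only [List.foldl_cons]
      rw [ih, mem_inner_fold]
      constructor
      · rintro (h | h)
        · rcases h with h | ⟨j, hj, hc, hq⟩
          · exact Or.inl h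
          · exact Or.inr ⟨i, by simp, j, hj, hc, hq⟩
        · rcases h with ⟨i', hi', j, hj, hc, hq⟩
          exact Or.inr ⟨i', by simp [hi'], j, hj, hc, hq⟩
      · rintro (h | ⟨i', hi', j, hj, hc, hq⟩)
        · exact Or.inl (Or.inl h)
        · rcases List.mem_cons.mp hi' with rfl | hi'
          · exact Or.inl (Or.inr ⟨j, hj, hc, hq⟩)
          · exact Or.inr ⟨i', hi', j, hj, hc, hq⟩
  rw [outer]
  constructor
  · rintro (h | ⟨i, hi, j, hj, hc, rfl⟩)
    · simp [PySem.Set.empty] at h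
    · rw [PySem.List.mem_pyRange_one] at hi hj
      have hInB : pvInB b (i, j) := ⟨hi.1, hi.2, hj.1, hj.2⟩
      refine ⟨hInB, ?_⟩
      rw [← cellB_eq b hi.1 hj.1]
      exact hc
  · rintro ⟨hin, hv⟩
    obtain ⟨h1, h2, h3, h4⟩ := hin
    right
    refine ⟨q.1, ?_, q.2, ?_, ?_, rfl⟩
    · rw [PySem.List.mem_pyRange_one]; exact ⟨h1, h2⟩
    · rw [PySem.List.mem_pyRange_one]; exact ⟨h3, h4⟩
    · rw [cellB_eq b h1 h3]; exact hv

lemma good_alive (b : List (List Int)) :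
    pvGood (pvAliveB b (b.length : Int) (pvCols b : Int)) b :=
  fun p => mem_alive b p

-- unfolding lemmas (definitional)
lemma dfsA_succ (f : Nat) (b : List (List Int)) (x y : Int) (your : List Int) (turn : Bool) :
    pvDfsA (f + 1) b [x, y] your turn =
      (if pvCellA b x y = 0 then ((turn, (0 : Int)), b)
       else
         (fun res =>
           if res.1 then ((!turn, res.2.2.1.getD 0), res.2.2.2) else ((turn, res.2.1), res.2.2.2))
         (pvDirs.foldl
           (fun (st : Bool × Int × Option Int × List (List Int)) (d : Int × Int) =>
             if 0 ≤ x + d.1 ∧ x + d.1 < (st.2.2.2.length : Int) ∧ 0 ≤ y + d.2 ∧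
                 y + d.2 < ((PySem.List.pyGetD st.2.2.2 0 []).length : Int) ∧
                 pvCellA st.2.2.2 (x + d.1) (y + d.2) = 1 then
               if turn == (pvDfsA f (pvSetA st.2.2.2 x y 0) your [x + d.1, y + d.2] (!turn)).1.1 then
                 (st.1,
                  max st.2.1 ((pvDfsA f (pvSetA st.2.2.2 x y 0) your [x + d.1, y + d.2] (!turn)).1.2 + 1),
                  st.2.2.1,
                  pvSetA (pvDfsA f (pvSetA st.2.2.2 x y 0) your [x + d.1, y + d.2] (!turn)).2 x y 1)
               else
                 (true, st.2.1,
                  (match st.2.2.1 with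
                   | none => some ((pvDfsA f (pvSetA st.2.2.2 x y 0) your [x + d.1, y + d.2] (!turn)).1.2 + 1)
                   | some m => some (min m ((pvDfsA f (pvSetA st.2.2.2 x y 0) your [x + d.1, y + d.2] (!turn)).1.2 + 1))),
                  pvSetA (pvDfsA f (pvSetA st.2.2.2 x y 0) your [x + d.1, y + d.2] (!turn)).2 x y 1)
             else st)
           (false, 0, none, b))) := rfl

lemma winP_succ (f : Nat) (s : PySem.Set (Int × Int)) (x y u v : Int) :
    pvWinP (f + 1) s (x, y) (u, v) =
      (if (x, y) ∈ s then
        (if (pvKids f s x y u v pvDirs).isEmpty then ((false : Bool), (0 : Int))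
         else
           match PySem.List.min? (pvLosing (pvKids f s x y u v pvDirs)) (fun m => m) with
           | some m => (true, 1 + m)
           | none =>
             (false, 1 + (PySem.List.max? ((pvKids f s x y u v pvDirs).map (·.2)) (fun m => m)).getD 0))
       else (false, 0)) := rfl

lemma kids_mem {f : Nat} {s : PySem.Set (Int × Int)} {x y u v : Int} {dirs : List (Int × Int)}
    {c : Bool × Int} (h : c ∈ pvKids f s x y u v dirs) :
    ∃ n : Int × Int, c = pvWinP f (PySem.Set.diff s [(x, y)]) (u, v) n := by
  rcases List.mem_filterMap.mp h with ⟨d, _, hd⟩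
  by_cases hm : (x + d.1, y + d.2) ∈ s
  · rw [if_pos hm] at hd
    exact ⟨(x + d.1, y + d.2), (Option.some_inj.mp hd).symm⟩
  · rw [if_neg hm] at hd; cases hd

-- every game value is a nonnegative move count
lemma winP_nonneg : ∀ (f : Nat) (s : PySem.Set (Int × Int)) (me you : Int × Int),
    0 ≤ (pvWinP f s me you).2 := by
  intro f
  induction f with
  | zero => intro s me you; simp [pvWinP]
  | succ f ih =>
    rintro s ⟨x, y⟩ ⟨u, v⟩
    rw [winP_succ]
    by_cases hm : (x, y) ∈ s
    · rw [if_pos hm]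
      by_cases he : (pvKids f s x y u v pvDirs).isEmpty
      · rw [if_pos he]
      · rw [if_neg he]
        split
        next m hmin =>
          have hmem := PySem.List.min?_mem hmin
          rcases List.mem_filterMap.mp hmem with ⟨c, hc, hcm⟩
          rcases kids_mem hc with ⟨n, rfl⟩
          have h0 := ih (PySem.Set.diff s [(x, y)]) (u, v) n
          by_cases hb : (pvWinP f (PySem.Set.diff s [(x, y)]) (u, v) n).1
          · rw [if_pos hb] at hcm; cases hcm
          · rw [if_neg hb] at hcm
            have : (pvWinP f (PySem.Set.diff s [(x, y)]) (u, v) n).2 = m :=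
              Option.some_inj.mp hcm
            show (0 : Int) ≤ 1 + m
            omega
        next hmin =>
          cases hmax : PySem.List.max? ((pvKids f s x y u v pvDirs).map (·.2)) (fun m => m) with
          | some M =>
            have hmem := PySem.List.max?_mem hmax
            rcases List.mem_map.mp hmem with ⟨c, hc, rfl⟩
            rcases kids_mem hc with ⟨n, rfl⟩
            have h0 := ih (PySem.Set.diff s [(x, y)]) (u, v) n
            show (0 : Int) ≤ 1 + (some _).getD 0
            rw [Option.getD_some]
            omega
          | none =>
            show (0 : Int) ≤ 1 + (none : Option Int).getD 0
            norm_num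
    · rw [if_neg hm]

-- fold arithmetic
lemma minShift (t : List Int) (a : Int) :
    (t.map (· + 1)).foldl min (a + 1) = t.foldl min a + 1 := by
  induction t generalizing a with
  | nil => rfl
  | cons x t ih => simp only [List.map_cons, List.foldl_cons, min_add_add_right]; exact ih _

lemma maxShift (t : List Int) (a : Int) :
    (t.map (· + 1)).foldl max (a + 1) = t.foldl max a + 1 := by
  induction t generalizing a with
  | nil => rfl
  | cons x t ih => simp only [List.map_cons, List.foldl_cons, max_add_add_right]; exact ih _

lemma minfold_some (t : List Int) (c : Int) :
    t.foldl pvMinStep (some c) = some ((t.map (· + 1)).foldl min c) := by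
  induction t generalizing c with
  | nil => rfl
  | cons x t ih => simp only [List.foldl_cons, List.map_cons, pvMinStep]; exact ih _

lemma minfold_none (l : List Int) :
    l.foldl pvMinStep none = (PySem.List.min? l (fun m => m)).map (· + 1) := by
  cases l with
  | nil => rfl
  | cons x t =>
    rw [PySem.List.min?_id_cons]
    simp only [List.foldl_cons, pvMinStep, Option.map_some]
    rw [minfold_some]
    congr 1
    exact minShift t x

lemma maxfold (c0 : Int) (t : List Int) (h0 : 0 ≤ c0) :
    (c0 :: t).foldl (fun a m => max a (m + 1)) 0 =
      1 + ((PySem.List.max? (c0 :: t) (fun m => m)).getD 0) := by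
  rw [PySem.List.max?_id_cons]
  simp only [List.foldl_cons, Option.getD_some]
  have h1 : max 0 (c0 + 1) = c0 + 1 := by omega
  rw [h1]
  have : t.foldl (fun a m => max a (m + 1)) (c0 + 1) = (t.map (· + 1)).foldl max (c0 + 1) := by
    rw [List.foldl_map]
  rw [this, maxShift]
  omega

-- the loop invariant for A's 4-direction fold
lemma loopLem (f : Nat) (b : List (List Int)) (x y u v : Int) (turn : Bool)
    (s : PySem.Set (Int × Int))
    (hne : b ≠ []) (hrect : pvRect b)
    (hmy : pvInB b (x, y)) (hyour : pvInB b (u, v))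
    (hVx : pvVal b x y = 1) (hVu : pvVal b u v = 0 ∨ pvVal b u v = 1)
    (hgood : pvGood s b)
    (IH : ∀ (b' : List (List Int)) (x' y' u' v' : Int) (turn' : Bool) (s' : PySem.Set (Int × Int)),
        b' ≠ [] → pvRect b' → pvInB b' (x', y') → pvInB b' (u', v') →
        (pvVal b' x' y' = 0 ∨ pvVal b' x' y' = 1) → (pvVal b' u' v' = 0 ∨ pvVal b' u' v' = 1) →
        pvGood s' b' →
        pvDfsA f b' [x', y'] [u', v'] turn' =
          ((if (pvWinP f s' (x', y') (u', v')).1 then !turn' else turn',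
            (pvWinP f s' (x', y') (u', v')).2), b')) :
    ∀ (dirs : List (Int × Int)), (∀ d ∈ dirs, ¬(d.1 = 0 ∧ d.2 = 0)) →
    ∀ (w0 : Bool) (mx0 : Int) (mn0 : Option Int),
    dirs.foldl
      (fun (st : Bool × Int × Option Int × List (List Int)) (d : Int × Int) =>
        if 0 ≤ x + d.1 ∧ x + d.1 < (st.2.2.2.length : Int) ∧ 0 ≤ y + d.2 ∧
            y + d.2 < ((PySem.List.pyGetD st.2.2.2 0 []).length : Int) ∧
            pvCellA st.2.2.2 (x + d.1) (y + d.2) = 1 then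
          if turn == (pvDfsA f (pvSetA st.2.2.2 x y 0) [u, v] [x + d.1, y + d.2] (!turn)).1.1 then
            (st.1,
             max st.2.1 ((pvDfsA f (pvSetA st.2.2.2 x y 0) [u, v] [x + d.1, y + d.2] (!turn)).1.2 + 1),
             st.2.2.1,
             pvSetA (pvDfsA f (pvSetA st.2.2.2 x y 0) [u, v] [x + d.1, y + d.2] (!turn)).2 x y 1)
          else
            (true, st.2.1,
             (match st.2.2.1 with
              | none => some ((pvDfsA f (pvSetA st.2.2.2 x y 0) [u, v] [x + d.1, y + d.2] (!turn)).1.2 + 1)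
              | some m => some (min m ((pvDfsA f (pvSetA st.2.2.2 x y 0) [u, v] [x + d.1, y + d.2] (!turn)).1.2 + 1))),
             pvSetA (pvDfsA f (pvSetA st.2.2.2 x y 0) [u, v] [x + d.1, y + d.2] (!turn)).2 x y 1)
        else st)
      (w0, mx0, mn0, b) =
      (w0 || !(pvLosing (pvKids f s x y u v dirs)).isEmpty,
       (pvWinning (pvKids f s x y u v dirs)).foldl (fun a m => max a (m + 1)) mx0,
       (pvLosing (pvKids f s x y u v dirs)).foldl pvMinStep mn0,
       b) := by
  intro dirs
  induction dirs with
  | nil =>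
    intro _ w0 mx0 mn0
    simp [pvKids, pvLosing, pvWinning]
  | cons d dirs ihd =>
    intro hd w0 mx0 mn0
    have hd' : ¬(d.1 = 0 ∧ d.2 = 0) := hd d List.mem_cons_self
    have hdirs' : ∀ d' ∈ dirs, ¬(d'.1 = 0 ∧ d'.2 = 0) := fun d' h => hd d' (List.mem_cons_of_mem _ h)
    simp only [List.foldl_cons]
    by_cases hm : (x + d.1, y + d.2) ∈ s
    · -- valid move
      have hin : pvInB b (x + d.1, y + d.2) := ((hgood _).mp hm).1
      have hval : pvVal b (x + d.1) (y + d.2) = 1 := ((hgood _).mp hm).2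
      have hcond : 0 ≤ x + d.1 ∧ x + d.1 < (b.length : Int) ∧ 0 ≤ y + d.2 ∧
          y + d.2 < ((PySem.List.pyGetD b 0 []).length : Int) ∧
          pvCellA b (x + d.1) (y + d.2) = 1 := by
        refine ⟨hin.1, hin.2.1, hin.2.2.1, ?_, ?_⟩
        · rw [pyGetD0]
          exact hin.2.2.2
        · rw [cellA_eq b hin.1 hin.2.2.1]
          exact hval
      rw [if_pos hcond]
      have hx0 : (0 : Int) ≤ x := hmy.1
      have hy0 : (0 : Int) ≤ y := hmy.2.2.1
      have hb1ne : pvSetA b x y 0 ≠ [] := ne_setA b 0 hx0 hy0 hne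
      have hb1rect : pvRect (pvSetA b x y 0) := rect_setA b 0 hx0 hy0 hrect
      have hnd : (x + d.1, y + d.2) ≠ (x, y) := by
        intro h
        rw [Prod.mk.injEq] at h
        exact hd' ⟨by omega, by omega⟩
      have hVn : pvVal (pvSetA b x y 0) (x + d.1) (y + d.2) = 1 := by
        rw [val_setA_ne b 0 hx0 hy0 hin.1 hin.2.2.1 hnd]
        exact hval
      have hVu1 : pvVal (pvSetA b x y 0) u v = 0 ∨ pvVal (pvSetA b x y 0) u v = 1 := by
        by_cases h : ((u, v) : Int × Int) = (x, y)
        · rw [Prod.mk.injEq] at h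
          rw [h.1, h.2]
          exact Or.inl (val_setA_self b 0 hx0 hy0 hmy.2.1 hmy.2.2.2 hrect)
        · rw [val_setA_ne b 0 hx0 hy0 hyour.1 hyour.2.2.1 h]
          exact hVu
      have hgood1 : pvGood (PySem.Set.diff s [(x, y)]) (pvSetA b x y 0) :=
        good_diff b s hx0 hy0 hmy.2.1 hmy.2.2.2 hrect hgood
      have hr := IH (pvSetA b x y 0) u v (x + d.1) (y + d.2) (!turn) (PySem.Set.diff s [(x, y)])
        hb1ne hb1rect ((inB_setA b 0 hx0 hy0 _).mpr hyour) ((inB_setA b 0 hx0 hy0 _).mpr hin)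
        hVu1 (Or.inr hVn) hgood1
      rw [hr]
      dsimp only
      have hrest : pvSetA (pvSetA b x y 0) x y 1 = b :=
        restoreA b hx0 hy0 hmy.2.1 hmy.2.2.2 hrect hVx
      rw [hrest]
      have hkids : pvKids f s x y u v (d :: dirs) =
          pvWinP f (PySem.Set.diff s [(x, y)]) (u, v) (x + d.1, y + d.2) ::
            pvKids f s x y u v dirs := by
        simp [pvKids, hm]
      rw [hkids]
      have hcondeq : (turn ==
          (if (pvWinP f (PySem.Set.diff s [(x, y)]) (u, v) (x + d.1, y + d.2)).1 then !(!turn)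
           else !turn)) = (pvWinP f (PySem.Set.diff s [(x, y)]) (u, v) (x + d.1, y + d.2)).1 := by
        cases h : (pvWinP f (PySem.Set.diff s [(x, y)]) (u, v) (x + d.1, y + d.2)).1 <;> simp
      rw [hcondeq]
      cases hKC1 : (pvWinP f (PySem.Set.diff s [(x, y)]) (u, v) (x + d.1, y + d.2)).1 with
      | true =>
        rw [if_pos rfl]
        rw [ihd hdirs' w0 (max mx0 ((pvWinP f (PySem.Set.diff s [(x, y)]) (u, v) (x + d.1, y + d.2)).2 + 1)) mn0]
        simp [pvLosing, pvWinning, hKC1]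
      | false =>
        rw [if_neg (by simp)]
        have hmn : (match mn0 with
            | none => some ((pvWinP f (PySem.Set.diff s [(x, y)]) (u, v) (x + d.1, y + d.2)).2 + 1)
            | some m => some (min m ((pvWinP f (PySem.Set.diff s [(x, y)]) (u, v) (x + d.1, y + d.2)).2 + 1))) =
            pvMinStep mn0 (pvWinP f (PySem.Set.diff s [(x, y)]) (u, v) (x + d.1, y + d.2)).2 := by
          cases mn0 <;> rfl
        rw [hmn]
        rw [ihd hdirs' true mx0 (pvMinStep mn0 (pvWinP f (PySem.Set.diff s [(x, y)]) (u, v) (x + d.1, y + d.2)).2)]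
        simp [pvLosing, pvWinning, hKC1]
    · -- no move in this direction
      have hcond' : ¬(0 ≤ x + d.1 ∧ x + d.1 < (b.length : Int) ∧ 0 ≤ y + d.2 ∧
          y + d.2 < ((PySem.List.pyGetD b 0 []).length : Int) ∧
          pvCellA b (x + d.1) (y + d.2) = 1) := by
        rintro ⟨h1, h2, h3, h4, h5⟩
        rw [pyGetD0] at h4
        rw [cellA_eq b h1 h3] at h5
        exact hm ((hgood _).mpr ⟨⟨h1, h2, h3, h4⟩, h5⟩)
      rw [if_neg hcond']
      have hkids : pvKids f s x y u v (d :: dirs) = pvKids f s x y u v dirs := by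
        simp [pvKids, hm]
      rw [hkids]
      exact ihd hdirs' w0 mx0 mn0

-- the heart: A's dfs equals the (unmemoized) game value, with the board restored
lemma mainLem : ∀ (f : Nat) (b : List (List Int)) (x y u v : Int) (turn : Bool)
    (s : PySem.Set (Int × Int)),
    b ≠ [] → pvRect b → pvInB b (x, y) → pvInB b (u, v) →
    (pvVal b x y = 0 ∨ pvVal b x y = 1) → (pvVal b u v = 0 ∨ pvVal b u v = 1) →
    pvGood s b →
    pvDfsA f b [x, y] [u, v] turn =
      ((if (pvWinP f s (x, y) (u, v)).1 then !turn else turn,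
        (pvWinP f s (x, y) (u, v)).2), b) := by
  intro f
  induction f with
  | zero =>
    intro b x y u v turn s hne hrect hmy hyour hVx hVu hgood
    simp [pvDfsA, pvWinP]
  | succ f ih =>
    intro b x y u v turn s hne hrect hmy hyour hVx hVu hgood
    rw [dfsA_succ, winP_succ]
    rcases hVx with hV0 | hV1
    · have hnotmem : ((x, y) : Int × Int) ∉ s := fun hmem => by
        have h := (hgood (x, y)).mp hmem
        rw [hV0] at h
        exact absurd h.2 (by norm_num)
      rw [if_pos (by rw [cellA_eq b hmy.1 hmy.2.2.1]; exact hV0), if_neg hnotmem]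
      simp
    · have hcell : ¬(pvCellA b x y = 0) := by
        rw [cellA_eq b hmy.1 hmy.2.2.1, hV1]; norm_num
      rw [if_neg hcell]
      have hmem : (x, y) ∈ s := (hgood (x, y)).mpr ⟨hmy, hV1⟩
      rw [if_pos hmem]
      have hdirs : ∀ d ∈ pvDirs, ¬(d.1 = 0 ∧ d.2 = 0) := by decide
      rw [loopLem f b x y u v turn s hne hrect hmy hyour hV1 hVu hgood ih pvDirs hdirs false 0 none]
      dsimp only
      simp only [Bool.false_or]
      cases hK : pvKids f s x y u v pvDirs with
      | nil => simp [pvLosing, pvWinning]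
      | cons c t =>
        have hc0 : 0 ≤ c.2 := by
          rcases kids_mem (hK ▸ List.mem_cons_self) with ⟨n, hn⟩
          rw [hn]
          exact winP_nonneg f _ _ _
        have hKe : ((c :: t : List (Bool × Int)).isEmpty) = false := rfl
        rw [hKe]
        simp only [Bool.false_eq_true, if_false]
        cases hmin : PySem.List.min? (pvLosing (c :: t)) (fun m => m) with
        | some m =>
          have hLne : pvLosing (c :: t) ≠ [] := by
            intro h
            rw [h, (PySem.List.min?_eq_none_iff ([] : List Int) (fun m => m)).mpr rfl] at hmin
            cases hmin
          have hW : (!(pvLosing (c :: t)).isEmpty) = true := by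
            cases hL : pvLosing (c :: t) with
            | nil => exact absurd hL hLne
            | cons a l => rfl
          rw [hW, if_pos rfl]
          dsimp only
          rw [minfold_none, hmin]
          simp only [Option.map_some, Option.getD_some]
          have hn : m + 1 = 1 + m := by omega
          rw [hn]
          simp
        | none =>
          have hL : pvLosing (c :: t) = [] := (PySem.List.min?_eq_none_iff _ _).mp hmin
          rw [hL]
          simp only [List.isEmpty_nil, Bool.not_true, Bool.false_eq_true, if_false]
          rw [winning_eq_map hL]
          have hmap : ((c :: t).map (·.2)) = c.2 :: t.map (·.2) := rfl
          rw [hmap, maxfold c.2 (t.map (·.2)) hc0]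

-- ===== the memo layer: the memoized port computes the unmemoized game value =====

-- removing the mover strictly shrinks the alive set
lemma diff_lt {s : PySem.Set (Int × Int)} {me : Int × Int} (h : me ∈ s) :
    (PySem.Set.diff s [me]).length < s.length := by
  show (s.filter _).length < s.length
  rw [List.length_filter_lt_length_iff_exists]
  exact ⟨me, h, by simp [PySem.Set.contains_eq_listContains]⟩

-- fuel does not matter once it exceeds the number of alive cells
lemma winP_stable : ∀ (f g : Nat) (s : PySem.Set (Int × Int)) (me you : Int × Int),
    s.length < f → s.length < g → pvWinP f s me you = pvWinP g s me you := by
  intro f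
  induction f with
  | zero => intro g s me you hf hg; omega
  | succ f ih =>
    intro g s me you hf hg
    obtain ⟨x, y⟩ := me; obtain ⟨u, v⟩ := you
    cases g with
    | zero => omega
    | succ g =>
      rw [winP_succ, winP_succ]
      by_cases hm : ((x, y) : Int × Int) ∈ s
      · have hkids : pvKids f s x y u v pvDirs = pvKids g s x y u v pvDirs := by
          unfold pvKids
          apply List.filterMap_congr
          intro d hd
          by_cases hmem : ((x + d.1, y + d.2) : Int × Int) ∈ s
          · rw [if_pos hmem, if_pos hmem]
            have hlt := diff_lt hm
            rw [ih g (PySem.Set.diff s [(x, y)]) (u, v) (x + d.1, y + d.2) (by omega) (by omega)]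
          · rw [if_neg hmem, if_neg hmem]
        rw [hkids]
      · rw [if_neg hm, if_neg hm]

-- memo invariant: every cached value is the game value of its key (at any sufficient fuel)
def MemoGood (m : PvMemo) : Prop :=
  ∀ k v, PySem.Dict.get? m k = some v → ∀ g : Nat, k.1.length < g → v = pvWinP g k.1 k.2.1 k.2.2

lemma winBmem_some (f : Nat) (memo : PvMemo) (alive : PySem.Set (Int × Int)) (me you : Int × Int)
    {v : Bool × Int} (h : PySem.Dict.get? memo (alive, me, you) = some v) :
    pvWinB (f + 1) memo alive me you = (v, memo) := by
  unfold pvWinB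
  rw [h]

lemma winBmem_none (f : Nat) (memo : PvMemo) (alive : PySem.Set (Int × Int)) (me you : Int × Int)
    (h : PySem.Dict.get? memo (alive, me, you) = none) :
    pvWinB (f + 1) memo alive me you =
      ((fun (p : (Bool × Int) × PvMemo) => (p.1, PySem.Dict.insert p.2 (alive, me, you) p.1))
       (if me ∈ alive then
          (fun (q : List (Bool × Int) × PvMemo) =>
            if q.1.isEmpty then (((false : Bool), (0 : Int)), q.2)
            else
              match PySem.List.min? (q.1.filterMap (fun c => if c.1 then none else some c.2)) (fun m => m) with
              | some m => ((true, 1 + m), q.2)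
              | none => ((false, 1 + (PySem.List.max? (q.1.map (·.2)) (fun m => m)).getD 0), q.2))
          (pvDirs.foldl
            (fun (acc : List (Bool × Int) × PvMemo) d =>
              if (me.1 + d.1, me.2 + d.2) ∈ alive then
                (acc.1 ++ [(pvWinB f acc.2 (PySem.Set.diff alive [me]) you (me.1 + d.1, me.2 + d.2)).1],
                 (pvWinB f acc.2 (PySem.Set.diff alive [me]) you (me.1 + d.1, me.2 + d.2)).2)
              else acc)
            ([], memo))
        else (((false : Bool), (0 : Int)), memo))) := by
  have hdef : pvWinB (f + 1) memo alive me you =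
      (match PySem.Dict.get? memo (alive, me, you) with
       | some v => (v, memo)
       | none =>
         ((fun (p : (Bool × Int) × PvMemo) => (p.1, PySem.Dict.insert p.2 (alive, me, you) p.1))
         (if me ∈ alive then
            (fun (q : List (Bool × Int) × PvMemo) =>
              if q.1.isEmpty then (((false : Bool), (0 : Int)), q.2)
              else
                match PySem.List.min? (q.1.filterMap (fun c => if c.1 then none else some c.2)) (fun m => m) with
                | some m => ((true, 1 + m), q.2)
                | none => ((false, 1 + (PySem.List.max? (q.1.map (·.2)) (fun m => m)).getD 0), q.2))
            (pvDirs.foldl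
              (fun (acc : List (Bool × Int) × PvMemo) d =>
                if (me.1 + d.1, me.2 + d.2) ∈ alive then
                  (acc.1 ++ [(pvWinB f acc.2 (PySem.Set.diff alive [me]) you (me.1 + d.1, me.2 + d.2)).1],
                   (pvWinB f acc.2 (PySem.Set.diff alive [me]) you (me.1 + d.1, me.2 + d.2)).2)
                else acc)
              ([], memo))
          else (((false : Bool), (0 : Int)), memo)))) := rfl
  rw [hdef, h]

-- the children loop: accumulates exactly pvKids and preserves the memo invariant
lemma foldMemo (f : Nat) (s : PySem.Set (Int × Int)) (x y u v : Int)
    (IH : ∀ (m : PvMemo) (s' : PySem.Set (Int × Int)) (me' you' : Int × Int),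
        MemoGood m → s'.length < f →
        (pvWinB f m s' me' you').1 = pvWinP f s' me' you' ∧ MemoGood (pvWinB f m s' me' you').2)
    (hlt : (PySem.Set.diff s [(x, y)]).length < f) :
    ∀ (dirs : List (Int × Int)) (acc0 : List (Bool × Int)) (m0 : PvMemo), MemoGood m0 →
    ∃ m1 : PvMemo,
      dirs.foldl
        (fun (acc : List (Bool × Int) × PvMemo) d =>
          if ((x + d.1, y + d.2) : Int × Int) ∈ s then
            (acc.1 ++ [(pvWinB f acc.2 (PySem.Set.diff s [(x, y)]) (u, v) (x + d.1, y + d.2)).1],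
             (pvWinB f acc.2 (PySem.Set.diff s [(x, y)]) (u, v) (x + d.1, y + d.2)).2)
          else acc)
        (acc0, m0) = (acc0 ++ pvKids f s x y u v dirs, m1) ∧ MemoGood m1 := by
  intro dirs
  induction dirs with
  | nil =>
    intro acc0 m0 hm0
    exact ⟨m0, by simp [pvKids], hm0⟩
  | cons d dirs ihd =>
    intro acc0 m0 hm0
    simp only [List.foldl_cons]
    by_cases hmem : ((x + d.1, y + d.2) : Int × Int) ∈ s
    · rw [if_pos hmem]
      obtain ⟨h1, h2⟩ := IH m0 (PySem.Set.diff s [(x, y)]) (u, v) (x + d.1, y + d.2) hm0 hlt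
      obtain ⟨m1, hfold, hm1⟩ := ihd
        (acc0 ++ [(pvWinB f m0 (PySem.Set.diff s [(x, y)]) (u, v) (x + d.1, y + d.2)).1]) _ h2
      refine ⟨m1, ?_, hm1⟩
      rw [hfold, h1]
      have hk : pvKids f s x y u v (d :: dirs) =
          pvWinP f (PySem.Set.diff s [(x, y)]) (u, v) (x + d.1, y + d.2) ::
            pvKids f s x y u v dirs := by
        simp [pvKids, hmem]
      rw [hk]
      simp
    · rw [if_neg hmem]
      have hk : pvKids f s x y u v (d :: dirs) = pvKids f s x y u v dirs := by
        simp [pvKids, hmem]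
      rw [hk]
      exact ihd acc0 m0 hm0

-- reading off the branch structure shared by port B and the specification
lemma branch_eq (K : List (Bool × Int)) (m1 : PvMemo) :
    (if K.isEmpty then (((false : Bool), (0 : Int)), m1)
     else
       match PySem.List.min? (K.filterMap (fun c => if c.1 then none else some c.2)) (fun m => m) with
       | some m => ((true, 1 + m), m1)
       | none => ((false, 1 + (PySem.List.max? (K.map (·.2)) (fun m => m)).getD 0), m1)) =
      ((if K.isEmpty then ((false : Bool), (0 : Int))
        else
          match PySem.List.min? (pvLosing K) (fun m => m) with
          | some m => (true, 1 + m)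
          | none => (false, 1 + (PySem.List.max? (K.map (·.2)) (fun m => m)).getD 0)), m1) := by
  dsimp only [pvLosing]
  by_cases h : K.isEmpty
  · rw [if_pos h, if_pos h]
  · rw [if_neg h, if_neg h]
    cases PySem.List.min? (K.filterMap fun c => if c.1 then none else some c.2) (fun m => m) <;> rfl

-- the heart of the memo layer: with a good memo and enough fuel, the memoized port
-- returns the unmemoized game value and leaves the memo good
lemma memoLem : ∀ (f : Nat) (m : PvMemo) (s : PySem.Set (Int × Int)) (me you : Int × Int),
    MemoGood m → s.length < f →
    (pvWinB f m s me you).1 = pvWinP f s me you ∧ MemoGood (pvWinB f m s me you).2 := by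
  intro f
  induction f with
  | zero => intro m s me you hm hlt; omega
  | succ f ih =>
    intro m s me you hm hlt
    obtain ⟨x, y⟩ := me; obtain ⟨u, v⟩ := you
    cases hget : PySem.Dict.get? m ((s, (x, y), (u, v)) :
        PySem.Set (Int × Int) × (Int × Int) × (Int × Int)) with
    | some v0 =>
      rw [winBmem_some f m s (x, y) (u, v) hget]
      refine ⟨?_, hm⟩
      simpa using hm _ _ hget (f + 1) hlt
    | none =>
      rw [winBmem_none f m s (x, y) (u, v) hget]
      by_cases hmem : ((x, y) : Int × Int) ∈ s
      · rw [if_pos hmem]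
        have hlt' : (PySem.Set.diff s [(x, y)]).length < f := by
          have := diff_lt hmem; omega
        dsimp only
        obtain ⟨m1, hfold, hm1⟩ := foldMemo f s x y u v ih hlt' pvDirs [] m hm
        rw [hfold]
        simp only [List.nil_append]
        rw [branch_eq (pvKids f s x y u v pvDirs) m1]
        dsimp only
        have hVal : pvWinP (f + 1) s (x, y) (u, v) =
            (if (pvKids f s x y u v pvDirs).isEmpty then ((false : Bool), (0 : Int))
             else
               match PySem.List.min? (pvLosing (pvKids f s x y u v pvDirs)) (fun m => m) with
               | some m => (true, 1 + m)
               | none =>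
                 (false, 1 + (PySem.List.max? ((pvKids f s x y u v pvDirs).map (·.2)) (fun m => m)).getD 0)) := by
          rw [winP_succ, if_pos hmem]
        constructor
        · exact hVal.symm
        · intro k' v' hk'
          rw [PySem.Dict.get?_insert] at hk'
          by_cases hkk : k' = ((s, (x, y), (u, v)) :
              PySem.Set (Int × Int) × (Int × Int) × (Int × Int))
          · rw [if_pos hkk] at hk'
            subst hkk
            intro g hg
            have hv' := Option.some_inj.mp hk'
            rw [← hv', ← hVal]
            exact (winP_stable g (f + 1) s (x, y) (u, v) hg hlt).symm
          · rw [if_neg hkk] at hk'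
            exact hm1 _ _ hk'
      · rw [if_neg hmem]
        refine ⟨?_, ?_⟩
        · show ((false : Bool), (0 : Int)) = pvWinP (f + 1) s (x, y) (u, v)
          rw [winP_succ, if_neg hmem]
        · intro k' v' hk'
          rw [PySem.Dict.get?_insert] at hk'
          by_cases hkk : k' = ((s, (x, y), (u, v)) :
              PySem.Set (Int × Int) × (Int × Int) × (Int × Int))
          · rw [if_pos hkk] at hk'
            subst hkk
            intro g hg
            have hv' := Option.some_inj.mp hk'
            rw [← hv']
            cases g with
            | zero => omega
            | succ g => rw [winP_succ, if_neg hmem]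
          · rw [if_neg hkk] at hk'
            exact hm _ _ hk'

-- the alive set is no larger than the board: the fuel chosen in both ports is sufficient
lemma nodup_inner_fold (b : List (List Int)) (i : Int) (l : List Int)
    (s0 : PySem.Set (Int × Int)) (h : s0.Nodup) :
    (l.foldl (fun s j => if pvCellB b i j = 1 then PySem.Set.add s (i, j) else s) s0).Nodup := by
  induction l generalizing s0 with
  | nil => exact h
  | cons j t ih =>
    simp only [List.foldl_cons]
    by_cases hc : pvCellB b i j = 1
    · rw [if_pos hc]
      exact ih _ (PySem.Set.nodup_add _ _ h)
    · rw [if_neg hc]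
      exact ih _ h

lemma nodup_alive (b : List (List Int)) (R C : Int) : (pvAliveB b R C).Nodup := by
  unfold pvAliveB
  have outer : ∀ (rows : List Int) (s0 : PySem.Set (Int × Int)), s0.Nodup →
      (rows.foldl (fun s i => (PySem.List.pyRange 0 C 1).foldl
        (fun s j => if pvCellB b i j = 1 then PySem.Set.add s (i, j) else s) s) s0).Nodup := by
    intro rows
    induction rows with
    | nil => intro s0 h; exact h
    | cons i t ih =>
      intro s0 h
      simp only [List.foldl_cons]
      exact ih _ (nodup_inner_fold b i _ s0 h)
  exact outer _ _ (by simp [PySem.Set.empty])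

lemma alive_le (b : List (List Int)) :
    (pvAliveB b (b.length : Int) (pvCols b : Int)).length ≤ b.length * pvCols b := by
  have hsub : ∀ p ∈ pvAliveB b (b.length : Int) (pvCols b : Int),
      p ∈ (PySem.List.pyRange 0 (b.length : Int) 1).flatMap
        (fun i => (PySem.List.pyRange 0 (pvCols b : Int) 1).map (fun j => ((i, j) : Int × Int))) := by
    intro p hp
    obtain ⟨⟨h1, h2, h3, h4⟩, _⟩ := (mem_alive b p).mp hp
    rw [List.mem_flatMap]
    refine ⟨p.1, by rw [PySem.List.mem_pyRange_one]; exact ⟨h1, h2⟩, ?_⟩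
    rw [List.mem_map]
    exact ⟨p.2, by rw [PySem.List.mem_pyRange_one]; exact ⟨h3, h4⟩, by simp⟩
  have hnd := nodup_alive b (b.length : Int) (pvCols b : Int)
  have hcard : (pvAliveB b (b.length : Int) (pvCols b : Int)).length ≤
      ((PySem.List.pyRange 0 (b.length : Int) 1).flatMap
        (fun i => (PySem.List.pyRange 0 (pvCols b : Int) 1).map (fun j => ((i, j) : Int × Int)))).length := by
    calc (pvAliveB b (b.length : Int) (pvCols b : Int)).length
        = (pvAliveB b (b.length : Int) (pvCols b : Int)).toFinset.card := by
          rw [List.toFinset_card_of_nodup hnd]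
      _ ≤ ((PySem.List.pyRange 0 (b.length : Int) 1).flatMap
            (fun i => (PySem.List.pyRange 0 (pvCols b : Int) 1).map (fun j => ((i, j) : Int × Int)))).toFinset.card := by
          apply Finset.card_le_card
          intro a ha
          rw [List.mem_toFinset] at *
          exact hsub a ha
      _ ≤ _ := List.toFinset_card_le _
  refine hcard.trans ?_
  have hlen : ∀ (n : Nat), (PySem.List.pyRange 0 (n : Int) 1).length = n := by
    intro n
    simp [pysem]
  rw [List.length_flatMap]
  have hmap : ((PySem.List.pyRange 0 (b.length : Int) 1).map
      (fun i => ((PySem.List.pyRange 0 (pvCols b : Int) 1).map (fun j => ((i, j) : Int × Int))).length)) =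
      (PySem.List.pyRange 0 (b.length : Int) 1).map (fun _ => pvCols b) := by
    apply List.map_congr_left
    intro i _
    rw [List.length_map]
    exact hlen (pvCols b)
  rw [hmap, List.map_const', List.sum_replicate, smul_eq_mul, hlen]

-- both programs return 0 when A's first player has no adjacent in-range cell of value 1
lemma foldConst (f : Nat) (b : List (List Int)) (x y : Int) (yl : List Int) (turn : Bool)
    (hB : ∀ d ∈ pvDirs, ¬(0 ≤ x + d.1 ∧ x + d.1 < (b.length : Int) ∧ 0 ≤ y + d.2 ∧
      y + d.2 < ((b.headD []).length : Int) ∧ pvVal b (x + d.1) (y + d.2) = 1)) :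
    ∀ (dirs : List (Int × Int)), (∀ d ∈ dirs, d ∈ pvDirs) →
    dirs.foldl
      (fun (st : Bool × Int × Option Int × List (List Int)) (d : Int × Int) =>
        if 0 ≤ x + d.1 ∧ x + d.1 < (st.2.2.2.length : Int) ∧ 0 ≤ y + d.2 ∧
            y + d.2 < ((PySem.List.pyGetD st.2.2.2 0 []).length : Int) ∧
            pvCellA st.2.2.2 (x + d.1) (y + d.2) = 1 then
          if turn == (pvDfsA f (pvSetA st.2.2.2 x y 0) yl [x + d.1, y + d.2] (!turn)).1.1 then
            (st.1,
             max st.2.1 ((pvDfsA f (pvSetA st.2.2.2 x y 0) yl [x + d.1, y + d.2] (!turn)).1.2 + 1),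
             st.2.2.1,
             pvSetA (pvDfsA f (pvSetA st.2.2.2 x y 0) yl [x + d.1, y + d.2] (!turn)).2 x y 1)
          else
            (true, st.2.1,
             (match st.2.2.1 with
              | none => some ((pvDfsA f (pvSetA st.2.2.2 x y 0) yl [x + d.1, y + d.2] (!turn)).1.2 + 1)
              | some m => some (min m ((pvDfsA f (pvSetA st.2.2.2 x y 0) yl [x + d.1, y + d.2] (!turn)).1.2 + 1))),
             pvSetA (pvDfsA f (pvSetA st.2.2.2 x y 0) yl [x + d.1, y + d.2] (!turn)).2 x y 1)
        else st)
      ((false : Bool), (0 : Int), (none : Option Int), b) =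
      ((false : Bool), (0 : Int), (none : Option Int), b) := by
  intro dirs
  induction dirs with
  | nil => intro _; rfl
  | cons d dirs ihd =>
    intro hd
    simp only [List.foldl_cons]
    rw [if_neg ?_]
    · exact ihd (fun d' h => hd d' (List.mem_cons_of_mem _ h))
    · rintro ⟨h1, h2, h3, h4, h5⟩
      rw [pyGetD0] at h4
      rw [cellA_eq b h1 h3] at h5
      exact hB d (hd d List.mem_cons_self) ⟨h1, h2, h3, h4, h5⟩

lemma dfsA_zero (b : List (List Int)) (x y : Int) (yl : List Int) (turn : Bool) (n : Nat)
    (hB : ∀ d ∈ pvDirs, ¬(0 ≤ x + d.1 ∧ x + d.1 < (b.length : Int) ∧ 0 ≤ y + d.2 ∧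
      y + d.2 < ((b.headD []).length : Int) ∧ pvVal b (x + d.1) (y + d.2) = 1)) :
    (pvDfsA (n + 1) b [x, y] yl turn).1.2 = 0 := by
  rw [dfsA_succ]
  by_cases h0 : pvCellA b x y = 0
  · rw [if_pos h0]
  · rw [if_neg h0]
    rw [foldConst n b x y yl turn hB pvDirs (fun d h => h)]
    rfl

lemma foldConstM (f : Nat) (alive : PySem.Set (Int × Int)) (x y : Int) (you : Int × Int)
    (hB : ∀ d ∈ pvDirs, ((x + d.1, y + d.2) : Int × Int) ∉ alive) :
    ∀ (dirs : List (Int × Int)), (∀ d ∈ dirs, d ∈ pvDirs) →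
    ∀ (acc0 : List (Bool × Int)) (m0 : PvMemo),
    dirs.foldl
      (fun (acc : List (Bool × Int) × PvMemo) d =>
        if ((x + d.1, y + d.2) : Int × Int) ∈ alive then
          (acc.1 ++ [(pvWinB f acc.2 (PySem.Set.diff alive [(x, y)]) you (x + d.1, y + d.2)).1],
           (pvWinB f acc.2 (PySem.Set.diff alive [(x, y)]) you (x + d.1, y + d.2)).2)
        else acc)
      (acc0, m0) = (acc0, m0) := by
  intro dirs
  induction dirs with
  | nil => intro _ acc0 m0; rfl
  | cons d dirs ihd =>
    intro hd acc0 m0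
    simp only [List.foldl_cons]
    rw [if_neg (hB d (hd d List.mem_cons_self))]
    exact ihd (fun d' h => hd d' (List.mem_cons_of_mem _ h)) acc0 m0

lemma winMemo_zero (b : List (List Int)) (x y : Int) (you : Int × Int) (n : Nat)
    (hB : ∀ d ∈ pvDirs, ¬(0 ≤ x + d.1 ∧ x + d.1 < (b.length : Int) ∧ 0 ≤ y + d.2 ∧
      y + d.2 < ((b.headD []).length : Int) ∧ pvVal b (x + d.1) (y + d.2) = 1)) :
    (pvWinB (n + 1) PySem.Dict.empty
      (pvAliveB b (b.length : Int) ((b.headD []).length : Int)) (x, y) you).1.2 = 0 := by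
  have hget : PySem.Dict.get? (PySem.Dict.empty : PvMemo)
      ((pvAliveB b (b.length : Int) ((b.headD []).length : Int), (x, y), you) :
        PySem.Set (Int × Int) × (Int × Int) × (Int × Int)) = none := by
    simp [pysem]
  rw [winBmem_none n _ _ _ _ hget]
  by_cases hmem : ((x, y) : Int × Int) ∈ pvAliveB b (b.length : Int) ((b.headD []).length : Int)
  · rw [if_pos hmem]
    dsimp only
    have hnot : ∀ d ∈ pvDirs,
        ((x + d.1, y + d.2) : Int × Int) ∉ pvAliveB b (b.length : Int) ((b.headD []).length : Int) := by
      intro d hd hmem'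
      have h := (mem_alive b _).mp hmem'
      exact hB d hd ⟨h.1.1, h.1.2.1, h.1.2.2.1, h.1.2.2.2, h.2⟩
    rw [foldConstM n _ x y you hnot pvDirs (fun d h => h) [] PySem.Dict.empty]
    rfl
  · rw [if_neg hmem]

-- ===== VERDICT (by name: the statement is the Claim_ definition above) =====
theorem solution_spec : Claim_equal_solution := by
  intro board aloc bloc hdom hpre
  obtain ⟨hne, hrows, hal, hwa0, hwa1, hwa2, hwa3, hcase⟩ := hpre
  obtain ⟨ax, ay, rfl⟩ : ∃ ax ay, aloc = [ax, ay] := by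
    match aloc, hal with
    | [ax, ay], _ => exact ⟨ax, ay, rfl⟩
  simp only [List.getD_cons_zero, List.getD_cons_succ] at hwa0 hwa1 hwa2 hwa3 hcase
  unfold Spec_solution
  have hF : board.length * (board.headD []).length + 2 =
      (board.length * (board.headD []).length + 1) + 1 := rfl
  rcases hcase with ⟨hrect, ha0, ha2, hbl, hb0, hb1, hb2, hb3, hva, hvb⟩ | hB
  · -- the two locations are in range with 0/1 platform values: the full game equivalence
    obtain ⟨bx, by', rfl⟩ : ∃ bx by', bloc = [bx, by'] := by
      match bloc, hbl with
      | [bx, by'], _ => exact ⟨bx, by', rfl⟩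
    simp only [List.getD_cons_zero, List.getD_cons_succ] at hb0 hb1 hb2 hb3 hvb
    rw [if_neg (not_lt.mpr ha0)] at hwa3
    have hxlt : ax.toNat < board.length := by omega
    have hrow : board.getD ax.toNat [] ∈ board := by
      rw [List.getD_eq_getElem board [] hxlt]
      exact List.getElem_mem hxlt
    have hwa3' : ay < ((board.headD []).length : Int) := by
      have hlen := hrect _ hrow
      rw [hlen] at hwa3
      exact hwa3
    show (pvDfsA (board.length * (PySem.List.pyGetD board 0 []).length + 2) board [ax, ay]
        [bx, by'] false).1.2 =
      (if pvCellB board ax ay ≠ 1 then 0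
       else (pvWinB (board.length * (PySem.List.pyGetD board 0 []).length + 2) PySem.Dict.empty
        (pvAliveB board (board.length : Int) ((PySem.List.pyGetD board 0 []).length : Int))
        (ax, ay) (bx, by')).1.2)
    rw [pyGetD0]
    have hmain := mainLem (board.length * (board.headD []).length + 2) board ax ay bx by' false
      (pvAliveB board (board.length : Int) ((board.headD []).length : Int))
      hne hrect ⟨ha0, hwa1, ha2, hwa3'⟩ ⟨hb0, hb1, hb2, hb3⟩ hva hvb (good_alive board)
    rw [hmain]
    rcases hva with hv0 | hv1
    · have hg : pvCellB board ax ay ≠ 1 := by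
        rw [cellB_eq board ha0 ha2, hv0]; norm_num
      rw [if_pos hg]
      have hnot : ((ax, ay) : Int × Int) ∉
          pvAliveB board (board.length : Int) ((board.headD []).length : Int) := by
        intro hmem
        have h := (mem_alive board (ax, ay)).mp hmem
        rw [hv0] at h
        exact absurd h.2 (by norm_num)
      show (pvWinP (board.length * (board.headD []).length + 2)
        (pvAliveB board (board.length : Int) ((board.headD []).length : Int)) (ax, ay) (bx, by')).2 = 0
      rw [hF, winP_succ, if_neg hnot]
    · have hg : ¬(pvCellB board ax ay ≠ 1) := by
        rw [cellB_eq board ha0 ha2, hv1]; norm_num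
      rw [if_neg hg]
      have hMG : MemoGood (PySem.Dict.empty : PvMemo) := by
        intro k v hk
        rw [PySem.Dict.get?_empty] at hk
        cases hk
      have hbound : (pvAliveB board (board.length : Int)
          ((board.headD []).length : Int)).length <
          board.length * (board.headD []).length + 2 := by
        have := alive_le board
        unfold pvCols at this
        omega
      obtain ⟨h1, _⟩ := memoLem (board.length * (board.headD []).length + 2) PySem.Dict.empty
        (pvAliveB board (board.length : Int) ((board.headD []).length : Int))
        (ax, ay) (bx, by') hMG hbound
      rw [h1]
  · -- the A player has no adjacent alive cell: both games end immediately with 0 moves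
    have hB' : ∀ d ∈ pvDirs, ¬(0 ≤ ax + d.1 ∧ ax + d.1 < (board.length : Int) ∧ 0 ≤ ay + d.2 ∧
        ay + d.2 < ((board.headD []).length : Int) ∧ pvVal board (ax + d.1) (ay + d.2) = 1) := hB
    have hwz : ∀ you : Int × Int,
        (pvWinB (board.length * (board.headD []).length + 2) PySem.Dict.empty
          (pvAliveB board (board.length : Int) ((board.headD []).length : Int))
          (ax, ay) you).1.2 = 0 := by
      intro you
      rw [hF]
      exact winMemo_zero board ax ay you _ hB'
    have hdz : ∀ yl : List Int,
        (pvDfsA (board.length * (board.headD []).length + 2) board [ax, ay] yl false).1.2 = 0 := by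
      intro yl
      rw [hF]
      exact dfsA_zero board ax ay yl false _ hB'
    rcases bloc with _ | ⟨bx, bl⟩
    · show (pvDfsA (board.length * (PySem.List.pyGetD board 0 []).length + 2) board [ax, ay]
          [] false).1.2 = (if pvCellB board ax ay ≠ 1 then (0 : Int) else 0)
      rw [pyGetD0, hdz [], ite_self]
    · rcases bl with _ | ⟨by', bl2⟩
      · show (pvDfsA (board.length * (PySem.List.pyGetD board 0 []).length + 2) board [ax, ay]
            [bx] false).1.2 = (if pvCellB board ax ay ≠ 1 then (0 : Int) else 0)
        rw [pyGetD0, hdz [bx], ite_self]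
      · rcases bl2 with _ | ⟨z, bl3⟩
        · show (pvDfsA (board.length * (PySem.List.pyGetD board 0 []).length + 2) board [ax, ay]
              [bx, by'] false).1.2 =
            (if pvCellB board ax ay ≠ 1 then 0
             else (pvWinB (board.length * (PySem.List.pyGetD board 0 []).length + 2) PySem.Dict.empty
              (pvAliveB board (board.length : Int) ((PySem.List.pyGetD board 0 []).length : Int))
              (ax, ay) (bx, by')).1.2)
          rw [pyGetD0, hdz [bx, by']]
          by_cases hg : pvCellB board ax ay ≠ 1
          · rw [if_pos hg]
          · rw [if_neg hg, hwz (bx, by')]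
        · show (pvDfsA (board.length * (PySem.List.pyGetD board 0 []).length + 2) board [ax, ay]
              (bx :: by' :: z :: bl3) false).1.2 =
            (if pvCellB board ax ay ≠ 1 then (0 : Int) else 0)
          rw [pyGetD0, hdz (bx :: by' :: z :: bl3), ite_self]
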